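-- pv_equiv track=rewrite | github.com/asperaa/back_to_grind | DP/334. Increasing Triplet Subsequence.py | lis_k
-- ===== SOURCE A (Python) =====
-- def lis_k(nums, k):
--     small_arr = [float('inf')] * (k-1)
--     for num in nums:
--         for i in range(k-1):
--             if num <= small_arr[i]:
--                 small_arr[i] = num
--                 break
--         if num > small_arr[-1]:
--             return True
--     return False
-- ===== SOURCE B (Python) =====
-- def lis_k(nums, k):
--     # Patience-style tails array: tails[i] = smallest possible tail of an
--     # increasing subsequence of length i+1; binary search replaces A's inner scan.
--     tails = []
--     for num in nums:
--         lo, hi = 0, len(tails)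
--         while lo < hi:
--             mid = (lo + hi) // 2
--             if tails[mid] < num:
--                 lo = mid + 1
--             else:
--                 hi = mid
--         if lo == k - 1:
--             return True
--         if lo == len(tails):
--             tails.append(num)
--         else:
--             tails[lo] = num
--     return False
-- ===== Notes on version B (the rewrite author's own statement) =====
-- stated objective: faster
-- what changed: Replaces A's O(k) linear scan over the inf-padded fixed array with binary search on a growing tails list (patience-sorting), returning True as soon as the insertion point reaches k-1.
import Mathlib
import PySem

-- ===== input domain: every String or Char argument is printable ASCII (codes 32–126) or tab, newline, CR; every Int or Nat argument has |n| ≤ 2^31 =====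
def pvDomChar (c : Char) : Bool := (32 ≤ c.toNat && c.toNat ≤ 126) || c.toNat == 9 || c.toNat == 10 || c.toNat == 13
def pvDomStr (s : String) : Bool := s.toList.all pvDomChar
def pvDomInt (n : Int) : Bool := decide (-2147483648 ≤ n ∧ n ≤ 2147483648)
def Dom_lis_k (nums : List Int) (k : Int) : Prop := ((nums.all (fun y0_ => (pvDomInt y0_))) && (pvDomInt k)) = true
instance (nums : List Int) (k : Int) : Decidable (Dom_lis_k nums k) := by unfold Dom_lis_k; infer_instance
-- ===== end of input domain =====

-- B replaces A's O(k) inner scan over the padded array by binary search on a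
-- growing tails list (patience-sorting style); return value equivalence only.

-- ===== PORT A =====
-- slots hold `none` for float('inf'); `num <= float('inf')` is always true
def pvLeSlot (num : Int) : Option Int → Bool
  | none => true
  | some y => decide (num ≤ y)

-- A's inner `for i in range(k-1): if num <= small_arr[i]: small_arr[i] = num; break`
def pvUpd (num : Int) : List (Option Int) → List (Option Int)
  | [] => []
  | x :: xs => if pvLeSlot num x then some num :: xs else x :: pvUpd num xs

-- `num > small_arr[-1]`; on the empty array Python raises IndexError (excluded
-- by Pre_), here `false`; `num > float('inf')` is false
def pvGtLast (num : Int) (arr : List (Option Int)) : Bool :=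
  match arr.getLast? with
  | some (some y) => decide (y < num)
  | _ => false

def pvGoA : List Int → List (Option Int) → Bool
  | [], _ => false
  | num :: rest, arr =>
    let arr' := pvUpd num arr
    if pvGtLast num arr' then true else pvGoA rest arr'

def lis_k (nums : List Int) (k : Int) : Bool :=
  pvGoA nums (List.replicate (k - 1).toNat none)

-- ===== PORT B =====
-- the hand-written `while lo < hi` binary search of Source B; `tails.getD mid 0`
-- is exact for `tails[mid]` since the loop keeps mid < hi ≤ len(tails)
-- structural recursion on the fuel `hi - lo`, which bounds the number of
-- iterations of the while loop (the interval halves each round)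
def pvBisectF (tails : List Int) (num : Int) : Nat → Nat → Nat → Nat
  | 0, lo, _ => lo
  | fuel + 1, lo, hi =>
    if lo < hi then
      let mid := (lo + hi) / 2
      if tails.getD mid 0 < num then pvBisectF tails num fuel (mid + 1) hi
      else pvBisectF tails num fuel lo mid
    else lo

def pvBisect (tails : List Int) (num : Int) (lo hi : Nat) : Nat :=
  pvBisectF tails num (hi - lo) lo hi

def pvGoB (k : Int) : List Int → List Int → Bool
  | [], _ => false
  | num :: rest, tails =>
    let lo := pvBisect tails num 0 tails.length
    if (lo : Int) = k - 1 then true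
    else if lo = tails.length then pvGoB k rest (tails ++ [num])
    else pvGoB k rest (tails.set lo num)

def lis_k_alt (nums : List Int) (k : Int) : Bool :=
  pvGoB k nums []

-- ===== PRECONDITION & SPEC =====
-- Pre_ excludes k ≤ 1 with nonempty nums: there small_arr is empty and A
-- raises IndexError on small_arr[-1].
def Pre_lis_k (nums : List Int) (k : Int) : Prop := 2 ≤ k ∨ nums = []
instance (nums : List Int) (k : Int) : Decidable (Pre_lis_k nums k) := by
  unfold Pre_lis_k; infer_instance

def pvWitness_lis_k : List Int × Int := ([1, 2, 3], 3)

def Spec_lis_k (nums : List Int) (k : Int) (out : Bool) : Prop := out = lis_k_alt nums k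
instance (nums : List Int) (k : Int) (out : Bool) : Decidable (Spec_lis_k nums k out) := by unfold Spec_lis_k; infer_instance

-- ===== CLAIM (what is proved, stated in full; the proofs are below) =====
def Claim_equal_lis_k : Prop := ∀ (nums : List Int) (k : Int), Dom_lis_k nums k → Pre_lis_k nums k → Spec_lis_k nums k (lis_k nums k)

-- ===== LEMMAS AND PROOFS =====

-- in a strictly increasing list, the elements < num are exactly the prefix of
-- length countP (· < num)
lemma pvBoundary (num : Int) (l : List Int) (h : l.Pairwise (· < ·)) (i : Nat)
    (hi : i < l.length) :
    l[i] < num ↔ i < l.countP (fun x => decide (x < num)) := by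
  induction l generalizing i with
  | nil => simp at hi
  | cons x xs ih =>
    rw [List.pairwise_cons] at h
    obtain ⟨hx, hxs⟩ := h
    rw [List.countP_cons]
    by_cases hlt : x < num
    · cases i with
      | zero => simp [hlt]
      | succ j =>
        have hj : j < xs.length := by simpa using hi
        simp only [List.getElem_cons_succ]
        rw [ih hxs j hj]
        simp [hlt]
    · have hz : xs.countP (fun x => decide (x < num)) = 0 := by
        rw [List.countP_eq_zero]
        intro a ha
        simp only [decide_eq_true_eq, not_lt]
        exact le_of_lt (lt_of_le_of_lt (not_lt.mp hlt) (hx a ha))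
      cases i with
      | zero => simp [hlt, hz]
      | succ j =>
        have hj : j < xs.length := by simpa using hi
        simp only [List.getElem_cons_succ]
        constructor
        · intro hc
          exact absurd hc (by
            have := hx xs[j] (List.getElem_mem hj)
            have := not_lt.mp hlt
            omega)
        · intro hc; simp [hlt, hz] at hc

lemma pvBisect_eq_aux (tails : List Int) (num : Int) (h : tails.Pairwise (· < ·)) :
    ∀ d lo hi, hi - lo ≤ d →
      lo ≤ tails.countP (fun x => decide (x < num)) →
      tails.countP (fun x => decide (x < num)) ≤ hi → hi ≤ tails.length →
      pvBisectF tails num d lo hi = tails.countP (fun x => decide (x < num)) := by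
  intro d
  induction d with
  | zero =>
    intro lo hi hd h1 h2 h3
    simp only [pvBisectF]
    omega
  | succ d ih =>
    intro lo hi hd h1 h2 h3
    rw [pvBisectF]
    by_cases hlh : lo < hi
    · simp only [if_pos hlh]
      have hmid : (lo + hi) / 2 < tails.length := by omega
      have hb := pvBoundary num tails h ((lo + hi) / 2) hmid
      rw [List.getD_eq_getElem tails 0 hmid]
      by_cases hc : tails[(lo + hi) / 2] < num
      · have := hb.mp hc
        simp only [if_pos hc]
        exact ih ((lo + hi) / 2 + 1) hi (by omega) (by omega) h2 h3
      · have : ¬ ((lo + hi) / 2 < tails.countP (fun x => decide (x < num))) :=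
          fun hlt => hc (hb.mpr hlt)
        simp only [if_neg hc]
        exact ih lo ((lo + hi) / 2) (by omega) h1 (by omega) (by omega)
    · simp only [if_neg hlh]; omega

lemma pvBisect_eq (tails : List Int) (num : Int) (h : tails.Pairwise (· < ·)) :
    pvBisect tails num 0 tails.length = tails.countP (fun x => decide (x < num)) := by
  exact pvBisect_eq_aux tails num h (tails.length - 0) 0 tails.length (by omega)
    (by omega) List.countP_le_length (le_refl _)

-- A's scan replaces in place when the insertion point is interior
lemma pvUpd_set (num : Int) (tails : List Int) (r : List (Option Int))
    (h : tails.Pairwise (· < ·))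
    (hc : tails.countP (fun x => decide (x < num)) < tails.length) :
    pvUpd num (tails.map some ++ r) =
      (tails.set (tails.countP (fun x => decide (x < num))) num).map some ++ r := by
  induction tails generalizing r with
  | nil => simp at hc
  | cons x xs ih =>
    rw [List.pairwise_cons] at h
    obtain ⟨hx, hxs⟩ := h
    by_cases hle : num ≤ x
    · have hz : (x :: xs).countP (fun x => decide (x < num)) = 0 := by
        rw [List.countP_eq_zero]
        intro a ha
        simp only [decide_eq_true_eq, not_lt]
        rcases List.mem_cons.mp ha with rfl | ha
        · exact hle
        · exact le_of_lt (lt_of_le_of_lt hle (hx a ha))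
      rw [hz]
      simp [pvUpd, pvLeSlot, hle]
    · have hlt : x < num := not_le.mp hle
      have hcc : (x :: xs).countP (fun x => decide (x < num)) =
          xs.countP (fun x => decide (x < num)) + 1 := by
        rw [List.countP_cons]; simp [hlt]
      rw [hcc]
      have hcx : xs.countP (fun x => decide (x < num)) < xs.length := by
        simp only [List.length_cons] at hc; omega
      simp only [List.map_cons, List.cons_append, pvUpd, pvLeSlot,
        decide_eq_true_eq, if_neg hle, List.set_cons_succ]
      rw [ih r hxs hcx]

lemma pvUpd_all_lt (num : Int) (tails : List Int) (r : List (Option Int))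
    (h : ∀ x ∈ tails, x < num) :
    pvUpd num (tails.map some ++ r) = tails.map some ++ pvUpd num r := by
  induction tails with
  | nil => simp
  | cons x xs ih =>
    have hle : ¬ num ≤ x := not_le.mpr (h x (by simp))
    simp only [List.map_cons, List.cons_append, pvUpd, pvLeSlot,
      decide_eq_true_eq, if_neg hle]
    rw [ih (fun y hy => h y (by simp [hy]))]

lemma pvGtLast_trailing_none (num : Int) (l : List (Option Int)) (m : Nat) :
    pvGtLast num (l ++ List.replicate (m + 1) none) = false := by
  unfold pvGtLast
  have : (l ++ List.replicate (m + 1) none).getLast? = some none := by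
    rw [List.getLast?_append_of_ne_nil _ (by simp), List.getLast?_replicate]
    simp
  rw [this]

lemma pvGtLast_map_some (num : Int) (l : List Int) (hne : l ≠ []) :
    pvGtLast num (l.map some) = decide (l[l.length - 1]'(by
      have := List.length_pos_iff.mpr hne; omega) < num) := by
  unfold pvGtLast
  rw [List.getLast?_map]
  rw [List.getLast?_eq_getElem? ]
  have hl : l.length - 1 < l.length := by
    have := List.length_pos_iff.mpr hne; omega
  rw [List.getElem?_eq_getElem hl]
  simp

-- strict increase is preserved by B's two updates
lemma pvSet_pairwise (num : Int) (tails : List Int) (h : tails.Pairwise (· < ·))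
    (hc : tails.countP (fun x => decide (x < num)) < tails.length) :
    (tails.set (tails.countP (fun x => decide (x < num))) num).Pairwise (· < ·) := by
  set c := tails.countP (fun x => decide (x < num)) with hcdef
  rw [List.pairwise_iff_getElem] at h ⊢
  intro i j hi hj hij
  simp only [List.length_set] at hi hj
  have hb := pvBoundary num tails (by rw [List.pairwise_iff_getElem]; exact h)
  rw [List.getElem_set, List.getElem_set]
  have hcnum : ¬ tails[c] < num := fun hlt => by
    have := (hb c hc).mp hlt; omega
  split_ifs with h1 h2
  · omega
  · -- i = c, j ≠ c : num < tails[j]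
    have : tails[c] < tails[j] := h c j hc hj (by omega)
    omega
  · -- i ≠ c, j = c : tails[i] < num, since i < j = c
    exact (hb i hi).mpr (by omega)
  · exact h i j hi hj hij

lemma pvAppend_pairwise (num : Int) (tails : List Int) (h : tails.Pairwise (· < ·))
    (hall : ∀ x ∈ tails, x < num) :
    (tails ++ [num]).Pairwise (· < ·) := by
  rw [List.pairwise_append]
  refine ⟨h, by simp, ?_⟩
  intro a ha b hb
  simp only [List.mem_singleton] at hb
  subst hb
  exact hall a ha

-- the main step-by-step correspondence
lemma pvGo_eq (k : Int) (hk : 2 ≤ k) :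
    ∀ (nums tails : List Int), tails.Pairwise (· < ·) →
      tails.length ≤ (k - 1).toNat →
      pvGoA nums (tails.map some ++
          List.replicate ((k - 1).toNat - tails.length) none) =
        pvGoB k nums tails := by
  intro nums
  induction nums with
  | nil => intro tails _ _; simp [pvGoA, pvGoB]
  | cons num rest ih =>
    intro tails hp hlen
    have hcn : tails.countP (fun x => decide (x < num)) ≤ tails.length :=
      List.countP_le_length
    have hk1 : ((k - 1).toNat : Int) = k - 1 := by omega
    have hkpos : 1 ≤ (k - 1).toNat := by omega
    simp only [pvGoA, pvGoB]
    rw [pvBisect_eq tails num hp]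
    set c := tails.countP (fun x => decide (x < num)) with hc
    by_cases hcase : c < tails.length
    · -- interior replacement
      have harr : pvUpd num (tails.map some ++
            List.replicate ((k - 1).toNat - tails.length) none) =
          (tails.set c num).map some ++
            List.replicate ((k - 1).toNat - tails.length) none :=
        pvUpd_set num tails _ hp hcase
      rw [if_neg (by omega : ¬ ((c : Int) = k - 1)),
        if_neg (by omega : ¬ c = tails.length), harr]
      have hgt : pvGtLast num ((tails.set c num).map some ++
          List.replicate ((k - 1).toNat - tails.length) none) = false := by
        rcases Nat.eq_zero_or_pos ((k - 1).toNat - tails.length) with hm0 | hm0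
        · rw [hm0]
          simp only [List.replicate_zero, List.append_nil]
          have hsne : tails.set c num ≠ [] :=
            List.length_pos_iff.mp (by rw [List.length_set]; omega)
          rw [pvGtLast_map_some num _ hsne]
          simp only [List.length_set]
          have hl1 : tails.length - 1 < tails.length := by omega
          rw [List.getElem_set]
          split_ifs with hce
          · simp
          · have hb := pvBoundary num tails hp (tails.length - 1) hl1
            simp only [decide_eq_false_iff_not, not_lt]
            have : ¬ tails[tails.length - 1] < num := fun hlt => by
              have := hb.mp hlt; omega
            omega
        · obtain ⟨m', hm'⟩ : ∃ m', (k - 1).toNat - tails.length = m' + 1 :=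
            ⟨(k - 1).toNat - tails.length - 1, by omega⟩
          rw [hm']
          exact pvGtLast_trailing_none num _ m'
      rw [hgt]
      simp only [Bool.false_eq_true, if_false]
      have := ih (tails.set c num) (pvSet_pairwise num tails hp hcase)
        (by rw [List.length_set]; omega)
      rw [List.length_set] at this
      exact this
    · -- c = tails.length: all tails elements are < num
      have hceq : c = tails.length := by omega
      have hall : ∀ x ∈ tails, x < num := by
        intro x hx
        have := (List.countP_eq_length (p := fun x => decide (x < num))
          (l := tails)).mp (by omega) x hx
        simpa using this
      rcases Nat.eq_zero_or_pos ((k - 1).toNat - tails.length) with hm0 | hm0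
      · -- the tails array is full: both sides return true
        rw [if_pos (by omega : (c : Int) = k - 1)]
        have harr : pvUpd num (tails.map some ++
            List.replicate ((k - 1).toNat - tails.length) none) =
            tails.map some := by
          rw [hm0]
          simp only [List.replicate_zero, List.append_nil]
          have := pvUpd_all_lt num tails [] hall
          simpa [pvUpd] using this
        rw [harr]
        have hne : tails ≠ [] := by
          intro hcon
          rw [hcon] at hceq; simp at hceq; omega
        rw [pvGtLast_map_some num tails hne]
        have : tails[tails.length - 1]'(by
            have := List.length_pos_iff.mpr hne; omega) < num :=
          hall _ (List.getElem_mem _)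
        rw [if_pos (by simpa using this)]
      · -- append
        obtain ⟨m', hm'⟩ : ∃ m', (k - 1).toNat - tails.length = m' + 1 :=
          ⟨(k - 1).toNat - tails.length - 1, by omega⟩
        rw [if_neg (by omega : ¬ ((c : Int) = k - 1)), if_pos hceq, hm']
        have harr : pvUpd num (tails.map some ++ List.replicate (m' + 1) none) =
            (tails ++ [num]).map some ++ List.replicate m' none := by
          rw [pvUpd_all_lt num tails _ hall]
          simp [pvUpd, pvLeSlot, List.replicate_succ]
        rw [harr]
        have hgt : pvGtLast num ((tails ++ [num]).map some ++
            List.replicate m' none) = false := by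
          rcases Nat.eq_zero_or_pos m' with hm'0 | hm'0
          · rw [hm'0]
            simp only [List.replicate_zero, List.append_nil]
            rw [pvGtLast_map_some num _ (by simp)]
            simp
          · obtain ⟨m'', hm''⟩ : ∃ m'', m' = m'' + 1 := ⟨m' - 1, by omega⟩
            rw [hm'']
            exact pvGtLast_trailing_none num _ m''
        rw [hgt]
        simp only [Bool.false_eq_true, if_false]
        have := ih (tails ++ [num]) (pvAppend_pairwise num tails hp hall)
          (by simp; omega)
        have hlen' : (tails ++ [num]).length = tails.length + 1 := by simp
        rw [hlen'] at this
        have hmm : (k - 1).toNat - (tails.length + 1) = m' := by omega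
        rw [hmm] at this
        exact this

-- ===== VERDICT (by name: the statement is the Claim_ definition above) =====
theorem lis_k_spec : Claim_equal_lis_k := by
  intro nums k _ hpre
  unfold Spec_lis_k
  rcases hpre with hk | hnil
  · unfold lis_k lis_k_alt
    have := pvGo_eq k hk nums [] (by simp) (by simp)
    simpa using this
  · subst hnil
    simp [lis_k, lis_k_alt, pvGoA, pvGoB]
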